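-- pv_equiv track=rewrite | github.com/IQWPIT/xm_cs | work/Q/看板/new/测试.py | build_price_brand_structure
-- ===== SOURCE A (Python) =====
-- def build_price_brand_structure(price_ranges, sku_list, top_brands):
--     result = {label: {b: {"order": 0} for b in top_brands}
--               for _, _, label in price_ranges}
--
--     for _, brand, price, order in sku_list:
--         if brand not in top_brands:
--             continue
--         for min_p, max_p, label in price_ranges:
--             if min_p <= price < max_p:
--                 result[label][brand]["order"] += order
--                 break
--     return result
-- ===== SOURCE B (Python) =====
-- def build_price_brand_structure(price_ranges, sku_list, top_brands):
--     # Two-phase: memoized first-match label per price, flat (label, brand) counter,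
--     # then one comprehension assembles the nested structure.
--     brand_set = set(top_brands)
--     label_cache = {}
--     counts = {}
--     for _, brand, price, order in sku_list:
--         if brand not in brand_set:
--             continue
--         if price not in label_cache:
--             found = None
--             for lo, hi, lab in price_ranges:
--                 if lo <= price < hi:
--                     found = lab
--                     break
--             label_cache[price] = found
--         lab = label_cache[price]
--         if lab is not None:
--             key = (lab, brand)
--             counts[key] = counts.get(key, 0) + order
--     return {lab: {b: {"order": counts.get((lab, b), 0)} for b in top_brands}
--             for _, _, lab in price_ranges}
-- ===== Notes on version B (the rewrite author's own statement) =====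
-- stated objective: alternative
-- what changed: A pre-builds the nested label/brand dict and mutates it in place per sku; B classifies each sku once (set for brand membership, per-price memo of the first matching range) into a flat (label, brand) counter and assembles the nested structure in a single comprehension at the end.
import Mathlib
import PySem

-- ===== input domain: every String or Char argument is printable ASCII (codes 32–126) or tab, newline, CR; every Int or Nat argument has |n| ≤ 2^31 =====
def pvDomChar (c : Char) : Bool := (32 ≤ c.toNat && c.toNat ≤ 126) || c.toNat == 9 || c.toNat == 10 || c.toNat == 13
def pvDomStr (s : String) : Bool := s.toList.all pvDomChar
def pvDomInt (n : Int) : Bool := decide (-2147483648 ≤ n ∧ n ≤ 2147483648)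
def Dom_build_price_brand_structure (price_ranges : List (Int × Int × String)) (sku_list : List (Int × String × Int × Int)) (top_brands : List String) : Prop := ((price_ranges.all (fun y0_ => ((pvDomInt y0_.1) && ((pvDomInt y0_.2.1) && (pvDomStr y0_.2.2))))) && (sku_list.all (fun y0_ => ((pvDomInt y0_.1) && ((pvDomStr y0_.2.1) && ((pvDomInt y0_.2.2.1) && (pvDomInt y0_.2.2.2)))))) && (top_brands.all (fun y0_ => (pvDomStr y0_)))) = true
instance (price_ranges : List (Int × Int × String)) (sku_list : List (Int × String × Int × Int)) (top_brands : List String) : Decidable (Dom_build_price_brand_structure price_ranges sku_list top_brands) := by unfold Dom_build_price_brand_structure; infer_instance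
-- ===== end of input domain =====

-- B replaces A's in-place mutation of a pre-built nested dict by a flat (label, brand) counter with a
-- set for brand membership and a per-price memo of the first matching range, assembled at the end (objective: alternative).

-- ===== PORT A =====
-- inner `for min_p, max_p, label in price_ranges: … break` loop of A
def pbsInnerLoop (r : PySem.Dict String (PySem.Dict String (PySem.Dict String Int))) (brand : String)
    (price order : Int) : List (Int × Int × String) → PySem.Dict String (PySem.Dict String (PySem.Dict String Int))
  | [] => r
  | (min_p, max_p, label) :: rest =>
      if min_p ≤ price ∧ price < max_p then
        r.modify label PySem.Dict.empty (fun d =>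
          d.modify brand PySem.Dict.empty (fun dd => dd.modify "order" 0 (· + order)))
      else pbsInnerLoop r brand price order rest

-- one iteration of A's `for _, brand, price, order in sku_list` loop
def pbsAStep (price_ranges : List (Int × Int × String)) (top_brands : List String)
    (r : PySem.Dict String (PySem.Dict String (PySem.Dict String Int))) (s : Int × String × Int × Int) :
    PySem.Dict String (PySem.Dict String (PySem.Dict String Int)) :=
  if top_brands.contains s.2.1 then pbsInnerLoop r s.2.1 s.2.2.1 s.2.2.2 price_ranges else r

def build_price_brand_structure (price_ranges : List (Int × Int × String)) (sku_list : List (Int × String × Int × Int)) (top_brands : List String) : List (String × List (String × List (String × Int))) :=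
  let result : PySem.Dict String (PySem.Dict String (PySem.Dict String Int)) :=
    price_ranges.foldl (fun r t =>
      r.insert t.2.2 (top_brands.foldl (fun d b => d.insert b (PySem.Dict.empty.insert "order" 0)) PySem.Dict.empty))
      PySem.Dict.empty
  let result := sku_list.foldl (pbsAStep price_ranges top_brands) result
  result.items.map (fun p => (p.1, p.2.items.map (fun q => (q.1, q.2.items))))

-- ===== PORT B =====
-- B's `for lo, hi, lab in price_ranges: found = lab; break` scan (first matching label, None if no match)
def pbsFirstLabel (price : Int) : List (Int × Int × String) → Option String
  | [] => none
  | (lo, hi, lab) :: rest => if lo ≤ price ∧ price < hi then some lab else pbsFirstLabel price rest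

-- one iteration of B's sku loop: state = (label_cache, counts)
def pbsBStep (price_ranges : List (Int × Int × String)) (brand_set : PySem.Set String)
    (st : PySem.Dict Int (Option String) × PySem.Dict (String × String) Int) (s : Int × String × Int × Int) :
    PySem.Dict Int (Option String) × PySem.Dict (String × String) Int :=
  if PySem.Set.contains brand_set s.2.1 then
    let cache := if st.1.contains s.2.2.1 then st.1 else st.1.insert s.2.2.1 (pbsFirstLabel s.2.2.1 price_ranges)
    match cache.getD s.2.2.1 none with
    | some lab => (cache, st.2.insert (lab, s.2.1) (st.2.getD (lab, s.2.1) 0 + s.2.2.2))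
    | none => (cache, st.2)
  else st

def build_price_brand_structure_alt (price_ranges : List (Int × Int × String)) (sku_list : List (Int × String × Int × Int)) (top_brands : List String) : List (String × List (String × List (String × Int))) :=
  let brand_set : PySem.Set String := PySem.Set.ofList top_brands
  let counts := (sku_list.foldl (pbsBStep price_ranges brand_set) (PySem.Dict.empty, PySem.Dict.empty)).2
  let out : PySem.Dict String (PySem.Dict String (PySem.Dict String Int)) :=
    price_ranges.foldl (fun d t =>
      d.insert t.2.2 (top_brands.foldl (fun dd b => dd.insert b (PySem.Dict.empty.insert "order" (counts.getD (t.2.2, b) 0))) PySem.Dict.empty))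
      PySem.Dict.empty
  out.items.map (fun p => (p.1, p.2.items.map (fun q => (q.1, q.2.items))))

-- ===== PRECONDITION & SPEC =====
def Spec_build_price_brand_structure (price_ranges : List (Int × Int × String)) (sku_list : List (Int × String × Int × Int)) (top_brands : List String) (out : List (String × List (String × List (String × Int)))) : Prop := out = build_price_brand_structure_alt price_ranges sku_list top_brands
instance (price_ranges : List (Int × Int × String)) (sku_list : List (Int × String × Int × Int)) (top_brands : List String) (out : List (String × List (String × List (String × Int)))) : Decidable (Spec_build_price_brand_structure price_ranges sku_list top_brands out) := by unfold Spec_build_price_brand_structure; infer_instance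

-- ===== CLAIM (what is proved, stated in full; the proofs are below) =====
def Claim_equal_build_price_brand_structure : Prop := ∀ (price_ranges : List (Int × Int × String)) (sku_list : List (Int × String × Int × Int)) (top_brands : List String), Dom_build_price_brand_structure price_ranges sku_list top_brands → Spec_build_price_brand_structure price_ranges sku_list top_brands (build_price_brand_structure price_ranges sku_list top_brands)

-- ===== LEMMAS AND PROOFS =====

-- a dict whose value is a function of the key
def pvMkMap {κ ν : Type} (xs : List κ) (v : κ → ν) : PySem.Dict κ ν := PySem.Dict.mk (xs.map (fun k => (k, v k)))

theorem pvMkMap_get? {κ ν : Type} [BEq κ] [LawfulBEq κ] [DecidableEq κ] (xs : List κ) (v : κ → ν) (k0 : κ) :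
    (pvMkMap xs v).get? k0 = if k0 ∈ xs then some (v k0) else none := by
  induction xs with
  | nil => simp [pvMkMap, PySem.Dict.get?]
  | cons x rest ih =>
    by_cases hx : x = k0
    · subst hx; simp [pvMkMap, PySem.Dict.get?]
    · have hstep : (pvMkMap (x :: rest) v).get? k0 = (pvMkMap rest v).get? k0 := by
        simp [pvMkMap, PySem.Dict.get?, hx]
      rw [hstep, ih]
      have hne : ¬ k0 = x := fun h => hx h.symm
      simp [List.mem_cons, hne]

theorem pvMkMap_contains {κ ν : Type} [BEq κ] [LawfulBEq κ] [DecidableEq κ] (xs : List κ) (v : κ → ν) (k0 : κ) :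
    (pvMkMap xs v).contains k0 = decide (k0 ∈ xs) := by
  rw [PySem.Dict.contains_eq_isSome_get?, pvMkMap_get?]
  by_cases h : k0 ∈ xs <;> simp [h]

theorem pvMkMap_congr {κ ν : Type} (xs : List κ) (v w : κ → ν) (h : ∀ k ∈ xs, v k = w k) :
    pvMkMap xs v = pvMkMap xs w := by
  unfold pvMkMap
  congr 1
  exact List.map_congr_left (fun k hk => by rw [h k hk])

theorem pvMkMap_insert_mem {κ ν : Type} [BEq κ] [LawfulBEq κ] [DecidableEq κ] (xs : List κ) (v : κ → ν)
    (k0 : κ) (w : ν) (h : k0 ∈ xs) :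
    (pvMkMap xs v).insert k0 w = pvMkMap xs (fun k => if k = k0 then w else v k) := by
  have hc : (pvMkMap xs v).contains k0 = true := by rw [pvMkMap_contains]; simpa
  unfold PySem.Dict.insert
  rw [hc]
  simp only [if_true]
  unfold pvMkMap
  congr 1
  rw [List.map_map]
  refine List.map_congr_left (fun k _ => ?_)
  by_cases hk : k = k0 <;> simp [hk]

theorem pvMkMap_modify_mem {κ ν : Type} [BEq κ] [LawfulBEq κ] [DecidableEq κ] (xs : List κ) (v : κ → ν)
    (k0 : κ) (dflt : ν) (f : ν → ν) (h : k0 ∈ xs) :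
    (pvMkMap xs v).modify k0 dflt f = pvMkMap xs (fun k => if k = k0 then f (v k0) else v k) := by
  unfold PySem.Dict.modify
  have hg : (pvMkMap xs v).getD k0 dflt = v k0 := by
    rw [PySem.Dict.getD_eq_get?_getD, pvMkMap_get?]; simp [h]
  rw [hg, pvMkMap_insert_mem _ _ _ _ h]

theorem pvFoldl_insert_mkMap {κ ν α : Type} [BEq κ] [LawfulBEq κ] [DecidableEq κ] (key : α → κ) (v : κ → ν) :
    ∀ (xs : List α) (seen : List κ),
    xs.foldl (fun d x => d.insert (key x) (v (key x))) (pvMkMap seen v)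
      = pvMkMap (PySem.Set.update seen (xs.map key)) v := by
  intro xs
  induction xs with
  | nil => intro seen; simp [PySem.Set.update]
  | cons x rest ih =>
    intro seen
    have hstep : (pvMkMap seen v).insert (key x) (v (key x)) = pvMkMap (PySem.Set.add seen (key x)) v := by
      by_cases h : key x ∈ seen
      · rw [pvMkMap_insert_mem _ _ _ _ h]
        have hadd : PySem.Set.add seen (key x) = seen := by
          simp [PySem.Set.add, PySem.Set.contains, h]
        rw [hadd]
        exact pvMkMap_congr _ _ _ (fun k _ => by by_cases hk : k = key x <;> simp [hk])
      · have hc : (pvMkMap seen v).contains (key x) = false := by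
          rw [pvMkMap_contains]; simpa
        have hins : (pvMkMap seen v).insert (key x) (v (key x)) = PySem.Dict.mk ((seen.map (fun k => (k, v k))) ++ [(key x, v (key x))]) := by
          unfold PySem.Dict.insert
          rw [hc]
          simp [pvMkMap]
        rw [hins]
        have hadd : PySem.Set.add seen (key x) = seen ++ [key x] := by
          simp [PySem.Set.add, PySem.Set.contains, h]
        rw [hadd]
        simp [pvMkMap]
    simp only [List.foldl_cons, hstep]
    rw [ih]
    rfl

-- canonical shape of the nested structure
def pvMid (top_brands : List String) (h : String → String → Int) (l : String) : PySem.Dict String (PySem.Dict String Int) :=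
  pvMkMap (PySem.Set.ofList top_brands) (fun b => PySem.Dict.mk [("order", h l b)])

def pvState (price_ranges : List (Int × Int × String)) (top_brands : List String) (h : String → String → Int) :
    PySem.Dict String (PySem.Dict String (PySem.Dict String Int)) :=
  pvMkMap (PySem.Set.ofList (price_ranges.map (·.2.2))) (pvMid top_brands h)

-- contribution of one sku to bucket (l, b)
def pvHit (price_ranges : List (Int × Int × String)) (top_brands : List String)
    (s : Int × String × Int × Int) (l b : String) : Int :=
  if top_brands.contains s.2.1 ∧ pbsFirstLabel s.2.2.1 price_ranges = some l ∧ s.2.1 = b then s.2.2.2 else 0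

def pvSum (price_ranges : List (Int × Int × String)) (top_brands : List String)
    (sk : List (Int × String × Int × Int)) (l b : String) : Int :=
  (sk.map (fun s => pvHit price_ranges top_brands s l b)).sum

theorem pvHit_eq (pr : List (Int × Int × String)) (tb : List String) (s : Int × String × Int × Int)
    (lab : String) (hb : tb.contains s.2.1 = true) (hfl : pbsFirstLabel s.2.2.1 pr = some lab) (l b : String) :
    pvHit pr tb s l b = if l = lab ∧ b = s.2.1 then s.2.2.2 else 0 := by
  unfold pvHit
  rw [hfl]
  by_cases hc : l = lab ∧ b = s.2.1
  · rw [if_pos hc, if_pos ⟨hb, by rw [hc.1], hc.2.symm⟩]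
  · rw [if_neg hc, if_neg (by rintro ⟨_, h2, h3⟩; exact hc ⟨(Option.some_inj.mp h2).symm, h3.symm⟩)]

theorem pvHit_zero_of_not_contains (pr : List (Int × Int × String)) (tb : List String)
    (s : Int × String × Int × Int) (hb : ¬ tb.contains s.2.1 = true) (l b : String) :
    pvHit pr tb s l b = 0 := by
  unfold pvHit
  rw [if_neg (by rintro ⟨h1, _⟩; exact hb h1)]

theorem pvHit_zero_of_none (pr : List (Int × Int × String)) (tb : List String)
    (s : Int × String × Int × Int) (hfl : pbsFirstLabel s.2.2.1 pr = none) (l b : String) :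
    pvHit pr tb s l b = 0 := by
  unfold pvHit
  rw [if_neg (by rintro ⟨_, h2, _⟩; rw [hfl] at h2; simp at h2)]

theorem pbsFirstLabel_mem (price : Int) (pr : List (Int × Int × String)) (lab : String)
    (h : pbsFirstLabel price pr = some lab) : lab ∈ pr.map (·.2.2) := by
  induction pr with
  | nil => simp [pbsFirstLabel] at h
  | cons t rest ih =>
    obtain ⟨lo, hi, l⟩ := t
    by_cases hc : lo ≤ price ∧ price < hi
    · simp [pbsFirstLabel, hc] at h; simp [h]
    · simp [pbsFirstLabel, hc] at h; simp [ih h]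

theorem pbsInnerLoop_eq (r : PySem.Dict String (PySem.Dict String (PySem.Dict String Int))) (brand : String)
    (price order : Int) (pr : List (Int × Int × String)) :
    pbsInnerLoop r brand price order pr =
      match pbsFirstLabel price pr with
      | none => r
      | some lab => r.modify lab PySem.Dict.empty (fun d =>
          d.modify brand PySem.Dict.empty (fun dd => dd.modify "order" 0 (· + order))) := by
  induction pr with
  | nil => rfl
  | cons t rest ih =>
    obtain ⟨lo, hi, l⟩ := t
    by_cases hc : lo ≤ price ∧ price < hi
    · simp [pbsInnerLoop, pbsFirstLabel, hc]
    · simp [pbsInnerLoop, pbsFirstLabel, hc, ih]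

theorem pvInner_modify (x o : Int) :
    (PySem.Dict.mk [("order", x)]).modify "order" 0 (· + o) = PySem.Dict.mk [("order", x + o)] := by
  rfl

theorem pvState_modify (pr : List (Int × Int × String)) (tb : List String) (h : String → String → Int)
    (lab brand : String) (o : Int)
    (hlab : lab ∈ pr.map (·.2.2)) (hbrand : brand ∈ tb) :
    (pvState pr tb h).modify lab PySem.Dict.empty (fun d =>
        d.modify brand PySem.Dict.empty (fun dd => dd.modify "order" 0 (· + o)))
      = pvState pr tb (fun l b => if l = lab ∧ b = brand then h l b + o else h l b) := by
  have hlab' : lab ∈ PySem.Set.ofList (pr.map (·.2.2)) := by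
    rw [PySem.Set.mem_ofList]; exact hlab
  have hbrand' : brand ∈ PySem.Set.ofList tb := by
    rw [PySem.Set.mem_ofList]; exact hbrand
  unfold pvState
  rw [pvMkMap_modify_mem _ _ _ _ _ hlab']
  refine pvMkMap_congr _ _ _ (fun l _ => ?_)
  by_cases hl : l = lab
  · subst hl
    rw [if_pos rfl]
    unfold pvMid
    rw [pvMkMap_modify_mem _ _ _ _ _ hbrand']
    refine pvMkMap_congr _ _ _ (fun b _ => ?_)
    by_cases hb : b = brand
    · subst hb; simp [pvInner_modify]
    · simp [hb]
  · simp only [if_neg hl]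
    unfold pvMid
    refine pvMkMap_congr _ _ _ (fun b _ => ?_)
    simp [hl]

theorem pvState_congr (pr : List (Int × Int × String)) (tb : List String) (h₁ h₂ : String → String → Int)
    (hh : ∀ l b, h₁ l b = h₂ l b) : pvState pr tb h₁ = pvState pr tb h₂ := by
  have : h₁ = h₂ := funext (fun l => funext (fun b => hh l b))
  rw [this]

-- A's initialization builds the canonical zero state
theorem pvA_init (pr : List (Int × Int × String)) (tb : List String) :
    pr.foldl (fun r t =>
        r.insert t.2.2 (tb.foldl (fun d b => d.insert b (PySem.Dict.empty.insert "order" 0)) PySem.Dict.empty))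
      PySem.Dict.empty
    = pvState pr tb (fun _ _ => 0) := by
  refine Eq.trans (b := pvMkMap (PySem.Set.update [] (pr.map (·.2.2)))
    (fun _ : String => tb.foldl (fun d b => d.insert b (PySem.Dict.empty.insert "order" (0 : Int))) PySem.Dict.empty)) ?_ ?_
  · exact pvFoldl_insert_mkMap (key := fun t : Int × Int × String => t.2.2)
      (v := fun _ : String => tb.foldl (fun d b => d.insert b (PySem.Dict.empty.insert "order" (0 : Int))) PySem.Dict.empty) pr []
  · rw [show PySem.Set.update [] (pr.map (·.2.2)) = PySem.Set.ofList (pr.map (·.2.2)) from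
      (PySem.Set.ofList_eq_foldl _).symm]
    refine pvMkMap_congr _ _ _ (fun l _ => ?_)
    refine Eq.trans (b := pvMkMap (PySem.Set.update [] (tb.map (fun b : String => b)))
      (fun _ : String => PySem.Dict.mk [("order", (0 : Int))])) ?_ ?_
    · exact pvFoldl_insert_mkMap (key := fun b : String => b)
        (v := fun _ : String => PySem.Dict.mk [("order", (0 : Int))]) tb []
    · rw [List.map_id', show PySem.Set.update [] tb = PySem.Set.ofList tb from (PySem.Set.ofList_eq_foldl _).symm]
      rfl

-- A's sku loop, in closed form
theorem pvA_loop (pr : List (Int × Int × String)) (tb : List String) :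
    ∀ (sk : List (Int × String × Int × Int)) (h : String → String → Int),
    sk.foldl (pbsAStep pr tb) (pvState pr tb h)
      = pvState pr tb (fun l b => h l b + pvSum pr tb sk l b) := by
  intro sk
  induction sk with
  | nil =>
    intro h
    simp only [List.foldl_nil]
    exact pvState_congr _ _ _ _ (fun l b => by simp [pvSum])
  | cons s rest ih =>
    intro h
    simp only [List.foldl_cons]
    by_cases hb : tb.contains s.2.1
    · have hstep : pbsAStep pr tb (pvState pr tb h) s
          = pbsInnerLoop (pvState pr tb h) s.2.1 s.2.2.1 s.2.2.2 pr := by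
        unfold pbsAStep; rw [if_pos hb]
      rw [hstep, pbsInnerLoop_eq]
      cases hfl : pbsFirstLabel s.2.2.1 pr with
      | none =>
        simp only []
        rw [ih h]
        refine pvState_congr _ _ _ _ (fun l b => ?_)
        simp only [pvSum, List.map_cons, List.sum_cons, pvHit_zero_of_none pr tb s hfl]
        ring
      | some lab =>
        simp only []
        have hbm : s.2.1 ∈ tb := by rw [← List.contains_iff_mem]; exact hb
        rw [pvState_modify pr tb h lab s.2.1 s.2.2.2 (pbsFirstLabel_mem _ _ _ hfl) hbm, ih]
        refine pvState_congr _ _ _ _ (fun l b => ?_)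
        simp only [pvSum, List.map_cons, List.sum_cons, pvHit_eq pr tb s lab hb hfl]
        by_cases hc : l = lab ∧ b = s.2.1
        · rw [if_pos hc, if_pos hc]; ring
        · rw [if_neg hc, if_neg hc]; ring
    · have hstep : pbsAStep pr tb (pvState pr tb h) s = pvState pr tb h := by
        unfold pbsAStep; rw [if_neg hb]
      rw [hstep, ih]
      refine pvState_congr _ _ _ _ (fun l b => ?_)
      simp only [pvSum, List.map_cons, List.sum_cons, pvHit_zero_of_not_contains pr tb s hb]
      ring

-- B's counter loop: cache invariant and counter value
def pvCacheOk (pr : List (Int × Int × String)) (cache : PySem.Dict Int (Option String)) : Prop :=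
  ∀ p v, cache.get? p = some v → v = pbsFirstLabel p pr

theorem pvSet_contains_eq (tb : List String) (x : String) :
    PySem.Set.contains (PySem.Set.ofList tb) x = tb.contains x := by
  by_cases h : x ∈ tb
  · have h1 : PySem.Set.contains (PySem.Set.ofList tb) x = true := by
      simp only [PySem.Set.contains]
      exact List.contains_iff_mem.mpr ((PySem.Set.mem_ofList tb x).mpr h)
    rw [h1, List.contains_iff_mem.mpr h]
  · have h1 : PySem.Set.contains (PySem.Set.ofList tb) x = false := by
      simp only [PySem.Set.contains]
      rw [Bool.eq_false_iff]
      intro hc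
      exact h ((PySem.Set.mem_ofList tb x).mp (List.contains_iff_mem.mp hc))
    have h2 : tb.contains x = false := by
      rw [Bool.eq_false_iff]
      intro hc
      exact h (List.contains_iff_mem.mp hc)
    rw [h1, h2]

theorem pvB_loop (pr : List (Int × Int × String)) (tb : List String) :
    ∀ (sk : List (Int × String × Int × Int)) (cache : PySem.Dict Int (Option String))
      (counts : PySem.Dict (String × String) Int) (_hok : pvCacheOk pr cache) (l b : String),
    (sk.foldl (pbsBStep pr (PySem.Set.ofList tb)) (cache, counts)).2.getD (l, b) 0
      = counts.getD (l, b) 0 + pvSum pr tb sk l b := by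
  intro sk
  induction sk with
  | nil => intro cache counts hok l b; simp [pvSum]
  | cons s rest ih =>
    intro cache counts hok l b
    simp only [List.foldl_cons]
    by_cases hb : tb.contains s.2.1
    · have hbs : PySem.Set.contains (PySem.Set.ofList tb) s.2.1 = true := by rw [pvSet_contains_eq]; exact hb
      set cache' := if cache.contains s.2.2.1 then cache else cache.insert s.2.2.1 (pbsFirstLabel s.2.2.1 pr) with hcache'
      have hok' : pvCacheOk pr cache' := by
        intro p v hv
        rw [hcache'] at hv
        by_cases hc : cache.contains s.2.2.1
        · rw [if_pos hc] at hv; exact hok p v hv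
        · rw [if_neg hc, PySem.Dict.get?_insert] at hv
          by_cases hp : p = s.2.2.1
          · rw [if_pos hp] at hv; subst hp; exact (Option.some_inj.mp hv).symm
          · rw [if_neg hp] at hv; exact hok p v hv
      have hget : cache'.getD s.2.2.1 none = pbsFirstLabel s.2.2.1 pr := by
        rw [hcache']
        by_cases hc : cache.contains s.2.2.1
        · rw [if_pos hc]
          have hsome := PySem.Dict.contains_eq_isSome_get? (d := cache) (k := s.2.2.1)
          rw [hc] at hsome
          rcases hv : cache.get? s.2.2.1 with _ | v
          · rw [hv] at hsome; simp at hsome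
          · rw [PySem.Dict.getD_eq_get?_getD, hv, Option.getD_some, hok s.2.2.1 v hv]
        · rw [if_neg hc, PySem.Dict.getD_insert_self]
      have hstep : pbsBStep pr (PySem.Set.ofList tb) (cache, counts) s
          = match pbsFirstLabel s.2.2.1 pr with
            | some lab => (cache', counts.insert (lab, s.2.1) (counts.getD (lab, s.2.1) 0 + s.2.2.2))
            | none => (cache', counts) := by
        unfold pbsBStep
        rw [if_pos hbs]
        simp only []
        rw [← hcache', hget]
      rw [hstep]
      cases hfl : pbsFirstLabel s.2.2.1 pr with
      | none =>
        simp only []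
        rw [ih cache' counts hok' l b]
        simp only [pvSum, List.map_cons, List.sum_cons, pvHit_zero_of_none pr tb s hfl]
        ring
      | some lab =>
        simp only []
        rw [ih cache' _ hok' l b, PySem.Dict.getD_insert]
        simp only [pvSum, List.map_cons, List.sum_cons, pvHit_eq pr tb s lab hb hfl]
        by_cases hc : (l, b) = (lab, s.2.1)
        · have hc2 := hc
          rw [Prod.mk.injEq] at hc2
          obtain ⟨h1, h2⟩ := hc2
          rw [if_pos hc, if_pos ⟨h1, h2⟩]
          subst h1; subst h2
          ring
        · rw [if_neg hc, if_neg (by rintro ⟨h1, h2⟩; exact hc (by rw [h1, h2]))]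
          ring
    · have hbs : PySem.Set.contains (PySem.Set.ofList tb) s.2.1 = false := by
        rw [pvSet_contains_eq, Bool.eq_false_iff]; exact hb
      have hstep : pbsBStep pr (PySem.Set.ofList tb) (cache, counts) s = (cache, counts) := by
        unfold pbsBStep
        rw [hbs]
        rfl
      rw [hstep, ih cache counts hok l b]
      simp only [pvSum, List.map_cons, List.sum_cons, pvHit_zero_of_not_contains pr tb s hb]
      ring

-- B's assembly builds the canonical state from the counter
theorem pvB_assemble (pr : List (Int × Int × String)) (tb : List String)
    (counts : PySem.Dict (String × String) Int) :
    pr.foldl (fun d t =>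
        d.insert t.2.2 (tb.foldl (fun dd b => dd.insert b (PySem.Dict.empty.insert "order" (counts.getD (t.2.2, b) 0))) PySem.Dict.empty))
      PySem.Dict.empty
    = pvState pr tb (fun l b => counts.getD (l, b) 0) := by
  have hinner : ∀ l : String,
      tb.foldl (fun dd b => dd.insert b (PySem.Dict.empty.insert "order" (counts.getD (l, b) 0))) PySem.Dict.empty
        = pvMid tb (fun l b => counts.getD (l, b) 0) l := by
    intro l
    refine Eq.trans (b := pvMkMap (PySem.Set.update [] (tb.map (fun b : String => b)))
      (fun b : String => PySem.Dict.mk [("order", counts.getD (l, b) 0)])) ?_ ?_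
    · exact pvFoldl_insert_mkMap (key := fun b : String => b)
        (v := fun b : String => PySem.Dict.mk [("order", counts.getD (l, b) 0)]) tb []
    · rw [List.map_id', show PySem.Set.update [] tb = PySem.Set.ofList tb from (PySem.Set.ofList_eq_foldl _).symm]
      rfl
  refine Eq.trans (b := pvMkMap (PySem.Set.update [] (pr.map (·.2.2)))
    (fun l : String => tb.foldl (fun dd b => dd.insert b (PySem.Dict.empty.insert "order" (counts.getD (l, b) 0))) PySem.Dict.empty)) ?_ ?_
  · exact pvFoldl_insert_mkMap (key := fun t : Int × Int × String => t.2.2)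
      (v := fun l : String => tb.foldl (fun dd b => dd.insert b (PySem.Dict.empty.insert "order" (counts.getD (l, b) 0))) PySem.Dict.empty) pr []
  · rw [show PySem.Set.update [] (pr.map (·.2.2)) = PySem.Set.ofList (pr.map (·.2.2)) from
      (PySem.Set.ofList_eq_foldl _).symm]
    exact pvMkMap_congr _ _ _ (fun l _ => hinner l)

-- ===== VERDICT (by name: the statement is the Claim_ definition above) =====
theorem build_price_brand_structure_spec : Claim_equal_build_price_brand_structure := by
  intro pr sk tb _
  unfold Spec_build_price_brand_structure
  unfold build_price_brand_structure build_price_brand_structure_alt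
  simp only []
  rw [pvA_init, pvA_loop, pvB_assemble]
  have hcounts : ∀ l b,
      (sk.foldl (pbsBStep pr (PySem.Set.ofList tb)) (PySem.Dict.empty, PySem.Dict.empty)).2.getD (l, b) 0
        = pvSum pr tb sk l b := by
    intro l b
    rw [pvB_loop pr tb sk PySem.Dict.empty PySem.Dict.empty
      (fun p v hv => by simp [PySem.Dict.get?_empty] at hv) l b]
    simp
  have hstate : pvState pr tb (fun l b => 0 + pvSum pr tb sk l b)
      = pvState pr tb (fun l b =>
          (sk.foldl (pbsBStep pr (PySem.Set.ofList tb)) (PySem.Dict.empty, PySem.Dict.empty)).2.getD (l, b) 0) :=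
    pvState_congr pr tb _ _ (fun l b => by rw [hcounts l b]; ring)
  rw [hstate]
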